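-- pv_equiv track=rewrite | github.com/honemik/Test2Qastella | pdf_tool.py | _extract_md_tables
-- ===== SOURCE A (Python) =====
-- from typing import List, Dict, Optional
--
-- def _extract_md_tables(md: str) -> List[List[List[str]]]:
--     tables: List[List[List[str]]] = []
--     lines = md.splitlines()
--     i = 0
--     while i < len(lines):
--         if lines[i].strip().startswith('|'):
--             table_lines = []
--             while i < len(lines) and lines[i].strip().startswith('|'):
--                 table_lines.append(lines[i])
--                 i += 1
--             rows = []
--             for line in table_lines:
--                 cells = [c.strip() for c in line.strip().strip('|').split('|')]
--                 rows.append(cells)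
--             tables.append(rows)
--         else:
--             i += 1
--     return tables
-- ===== SOURCE B (Python) =====
-- from typing import List
--
-- def _extract_md_tables(md: str) -> List[List[List[str]]]:
--     tables: List[List[List[str]]] = []
--     run: List[List[str]] = []
--     for line in md.splitlines():
--         if line.strip().startswith('|'):
--             run.append([c.strip() for c in line.strip().strip('|').split('|')])
--         elif run:
--             tables.append(run)
--             run = []
--     if run:
--         tables.append(run)
--     return tables
-- ===== Notes on version B (the rewrite author's own statement) =====
-- stated objective: simpler
-- what changed: Replaces A's index-driven outer while loop with a nested run-collecting while loop by one flat pass over the lines that accumulates the current table in a run buffer and flushes it at each non-table line (and at the end).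
import Mathlib
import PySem

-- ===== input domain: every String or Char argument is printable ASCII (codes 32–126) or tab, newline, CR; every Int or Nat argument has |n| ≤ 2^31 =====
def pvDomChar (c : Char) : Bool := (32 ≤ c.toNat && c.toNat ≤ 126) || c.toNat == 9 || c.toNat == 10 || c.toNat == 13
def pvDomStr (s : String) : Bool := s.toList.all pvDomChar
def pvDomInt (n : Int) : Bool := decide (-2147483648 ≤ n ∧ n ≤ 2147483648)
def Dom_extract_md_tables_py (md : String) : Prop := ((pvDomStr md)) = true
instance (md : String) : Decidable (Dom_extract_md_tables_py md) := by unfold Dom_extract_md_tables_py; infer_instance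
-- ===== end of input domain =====

-- B replaces A's index-driven outer/inner while loops by a single pass with a current-run
-- accumulator flushed at non-table lines (objective: simpler). Return values agree everywhere.

-- shared by both Pythons verbatim: lines[i].strip().startswith('|')
def pvIsBar (l : String) : Bool := PySem.Str.startswith (PySem.Str.strip l) "|"
-- shared by both Pythons verbatim: [c.strip() for c in line.strip().strip('|').split('|')]
def pvSplitRow (line : String) : List String :=
  ((PySem.Chars.splitOn (PySem.Str.stripChars (PySem.Str.strip line) "|").toList "|".toList).map
    (fun c => PySem.Str.strip (String.ofList c)))

-- ===== PORT A =====
-- inner while: collect the run of '|'-lines (table_lines) and the remaining lines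
def pvCollectA : List String → List String × List String
  | [] => ([], [])
  | l :: ls => if pvIsBar l then let p := pvCollectA ls; (l :: p.1, p.2) else ([], l :: ls)

theorem pvCollectA_len (ls : List String) : (pvCollectA ls).2.length ≤ ls.length := by
  induction ls with
  | nil => simp [pvCollectA]
  | cons l ls ih =>
    simp only [pvCollectA]
    split
    · simpa using Nat.le_succ_of_le ih
    · simp

-- outer while over the remaining lines
def pvLoopA : List String → List (List (List String))
  | [] => []
  | l :: ls =>
    if pvIsBar l then
      ((l :: (pvCollectA ls).1).map pvSplitRow) :: pvLoopA (pvCollectA ls).2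
    else pvLoopA ls
termination_by ls => ls.length
decreasing_by
  · exact Nat.lt_succ_of_le (pvCollectA_len ls)
  · simp

def extract_md_tables_py (md : String) : List (List (List String)) :=
  pvLoopA (PySem.Str.splitlines md)

-- ===== PORT B =====
-- one pass: `run` is the table being built, flushed into `tables` at a non-table line
def pvLoopB : List String → List (List (List String)) → List (List String) → List (List (List String))
  | [], tables, run => if run.isEmpty then tables else tables ++ [run]
  | l :: ls, tables, run =>
    if pvIsBar l then pvLoopB ls tables (run ++ [pvSplitRow l])
    else if run.isEmpty then pvLoopB ls tables run
    else pvLoopB ls (tables ++ [run]) []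

def extract_md_tables_py_alt (md : String) : List (List (List String)) :=
  pvLoopB (PySem.Str.splitlines md) [] []

-- ===== PRECONDITION & SPEC =====
def Spec_extract_md_tables_py (md : String) (out : List (List (List String))) : Prop := out = extract_md_tables_py_alt md
instance (md : String) (out : List (List (List String))) : Decidable (Spec_extract_md_tables_py md out) := by unfold Spec_extract_md_tables_py; infer_instance

-- ===== CLAIM (what is proved, stated in full; the proofs are below) =====
def Claim_equal_extract_md_tables_py : Prop := ∀ (md : String), Dom_extract_md_tables_py md → Spec_extract_md_tables_py md (extract_md_tables_py md)

-- ===== LEMMAS AND PROOFS =====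

theorem pvCollectA_eq (ls : List String) :
    pvCollectA ls = (ls.takeWhile pvIsBar, ls.dropWhile pvIsBar) := by
  induction ls with
  | nil => simp [pvCollectA]
  | cons l ls ih =>
    simp only [pvCollectA, List.takeWhile, List.dropWhile]
    cases h : pvIsBar l <;> simp [ih]

theorem pvLoopB_acc (ls : List String) (tables : List (List (List String)))
    (run : List (List String)) : pvLoopB ls tables run = tables ++ pvLoopB ls [] run := by
  induction ls generalizing tables run with
  | nil => simp only [pvLoopB]; split <;> simp
  | cons l ls ih =>
    simp only [pvLoopB]
    split
    · rw [ih, ih [] (run ++ [pvSplitRow l])]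
    · split
      · rw [ih, ih []]
      · rw [ih, ih ([] ++ [run])]; simp

theorem pvLoopB_midrun (ls : List String) (run : List (List String)) (h : ¬ run.isEmpty) :
    pvLoopB ls [] run
      = (run ++ (ls.takeWhile pvIsBar).map pvSplitRow) :: pvLoopB (ls.dropWhile pvIsBar) [] [] := by
  induction ls generalizing run with
  | nil => simp [pvLoopB, h]
  | cons l ls ih =>
    cases hl : pvIsBar l with
    | true =>
      have hne : ¬ (run ++ [pvSplitRow l]).isEmpty := by simp
      simp only [pvLoopB, hl, if_pos, List.takeWhile, List.dropWhile, ih _ hne]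
      simp
    | false =>
      simp only [pvLoopB, hl, List.takeWhile, List.dropWhile, Bool.false_eq_true,
        if_false, h]
      rw [pvLoopB_acc]
      simp

theorem pvLoop_eq (ls : List String) : pvLoopA ls = pvLoopB ls [] [] := by
  induction ls using pvLoopA.induct with
  | case1 => simp [pvLoopA, pvLoopB]
  | case2 l ls h ih =>
    rw [pvLoopA, if_pos h, pvCollectA_eq] at *
    rw [ih]
    simp only [pvLoopB, h, if_pos, List.nil_append]
    rw [pvLoopB_midrun ls [pvSplitRow l] (by simp)]
    simp
  | case3 l ls h ih =>
    rw [pvLoopA, if_neg h, ih]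
    simp only [pvLoopB]
    rw [if_neg h]
    simp

-- ===== VERDICT (by name: the statement is the Claim_ definition above) =====
theorem extract_md_tables_py_spec : Claim_equal_extract_md_tables_py := by
  intro md _
  show extract_md_tables_py md = extract_md_tables_py_alt md
  unfold extract_md_tables_py extract_md_tables_py_alt
  exact pvLoop_eq _
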